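-- pv_equiv track=rewrite | github.com/theSamPadilla/montaj | steps/lyrics/lyrics_render.py | _make_accumulated_lines
-- ===== SOURCE A (Python) =====
-- def _make_accumulated_lines(words: list, up_to_idx: int, wrap_points: set) -> list:
--     """Return list of line strings for words[0..up_to_idx] split at wrap_points."""
--     lines, current = [], []
--     for i in range(up_to_idx + 1):
--         if i in wrap_points and current:
--             lines.append(" ".join(current))
--             current = []
--         current.append(words[i]["word"])
--     if current:
--         lines.append(" ".join(current))
--     return lines
-- ===== SOURCE B (Python) =====
-- def _make_accumulated_lines(words: list, up_to_idx: int, wrap_points: set) -> list: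
--     """Return list of line strings for words[0..up_to_idx] split at wrap_points."""
--     breaks = sorted(p for p in wrap_points if 1 <= p <= up_to_idx)
--     bounds = [0] + breaks + [up_to_idx + 1]
--     lines = []
--     for lo, hi in zip(bounds, bounds[1:]):
--         if lo < hi:
--             lines.append(" ".join(words[j]["word"] for j in range(lo, hi)))
--     return lines
-- ===== Notes on version B (the rewrite author's own statement) =====
-- stated objective: alternative
-- what changed: Replaces the per-index accumulate-and-flush loop (mutable current buffer, conditional flushes) with an index-first pass: collect and sort the effective break positions, form the boundary list [0]+breaks+[up_to_idx+1], and emit one joined line per consecutive boundary pair.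
import Mathlib
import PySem

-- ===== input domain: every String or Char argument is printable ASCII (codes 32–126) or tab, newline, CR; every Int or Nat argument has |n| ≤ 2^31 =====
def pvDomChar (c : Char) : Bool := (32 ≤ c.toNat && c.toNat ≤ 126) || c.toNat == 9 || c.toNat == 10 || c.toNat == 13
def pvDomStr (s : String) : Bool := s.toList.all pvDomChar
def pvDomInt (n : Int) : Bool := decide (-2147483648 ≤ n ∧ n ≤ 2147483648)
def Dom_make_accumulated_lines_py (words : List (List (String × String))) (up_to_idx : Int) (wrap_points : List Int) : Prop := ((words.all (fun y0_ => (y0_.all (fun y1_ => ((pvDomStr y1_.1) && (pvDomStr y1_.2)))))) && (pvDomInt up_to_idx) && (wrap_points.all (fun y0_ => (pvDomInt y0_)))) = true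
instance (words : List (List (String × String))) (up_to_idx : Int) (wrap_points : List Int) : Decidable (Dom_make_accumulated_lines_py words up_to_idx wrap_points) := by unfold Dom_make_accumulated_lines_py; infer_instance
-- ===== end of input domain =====

-- B replaces A's accumulate-and-flush loop by computing the sorted break positions first and
-- joining one slice of words per consecutive boundary pair (same cost, different decomposition).

-- ===== PORT A =====
-- words[i]["word"], total form (Pre_ excludes the IndexError/KeyError inputs)
def pvGetWord (words : List (List (String × String))) (i : Int) : String :=
  ((PySem.List.pyGetD words i []).find? (fun p => p.1 == "word")).elim "" Prod.snd

-- one iteration of A's for-loop over state (lines, current)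
def pvStepA (words : List (List (String × String))) (wrap_points : List Int)
    (st : List String × List String) (i : Int) : List String × List String :=
  let st' := if i ∈ wrap_points ∧ st.2 ≠ [] then (st.1 ++ [PySem.Str.join " " st.2], ([] : List String)) else st
  (st'.1, st'.2 ++ [pvGetWord words i])

-- A's trailing 'if current: lines.append(...)'
def pvFlush (st : List String × List String) : List String :=
  if st.2 ≠ [] then st.1 ++ [PySem.Str.join " " st.2] else st.1

def make_accumulated_lines_py (words : List (List (String × String))) (up_to_idx : Int) (wrap_points : List Int) : List String :=
  pvFlush ((PySem.List.pyRange 0 (up_to_idx + 1) 1).foldl (pvStepA words wrap_points) ([], []))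

-- ===== PORT B =====
-- " ".join(words[j]["word"] for j in range(lo, hi))
def pvSeg (words : List (List (String × String))) (lo hi : Int) : String :=
  PySem.Str.join " " ((PySem.List.pyRange lo hi 1).map (pvGetWord words))

def make_accumulated_lines_py_alt (words : List (List (String × String))) (up_to_idx : Int) (wrap_points : List Int) : List String :=
  let breaks := PySem.List.sorted (wrap_points.filter (fun p => decide (1 ≤ p) && decide (p ≤ up_to_idx))) (fun x => x) false
  let bounds := (0 :: breaks) ++ [up_to_idx + 1]
  (bounds.zip bounds.tail).foldl (fun ls q => if q.1 < q.2 then ls ++ [pvSeg words q.1 q.2] else ls) []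

-- ===== PRECONDITION & SPEC =====
-- Nodup: wrap_points is a Python set, so its List Int representation holds distinct elements
-- (a list with duplicates corresponds to no Python input). The other two conjuncts exclude
-- exactly the inputs where A raises: IndexError (up_to_idx beyond words) and KeyError
-- (a visited dict without the "word" key).
def Pre_make_accumulated_lines_py (words : List (List (String × String))) (up_to_idx : Int) (wrap_points : List Int) : Prop :=
  wrap_points.Nodup ∧ up_to_idx < (words.length : Int) ∧
    ∀ d ∈ words.take (up_to_idx + 1).toNat, d.any (fun p => p.1 == "word") = true
instance (words : List (List (String × String))) (up_to_idx : Int) (wrap_points : List Int) : Decidable (Pre_make_accumulated_lines_py words up_to_idx wrap_points) := by unfold Pre_make_accumulated_lines_py; infer_instance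

def pvWitness_make_accumulated_lines_py : (List (List (String × String))) × Int × List Int :=
  ([[("word", "hello"), ("start", "0")], [("word", "big")], [("word", "world")]], 2, [2, 5])

def Spec_make_accumulated_lines_py (words : List (List (String × String))) (up_to_idx : Int) (wrap_points : List Int) (out : List String) : Prop := out = make_accumulated_lines_py_alt words up_to_idx wrap_points
instance (words : List (List (String × String))) (up_to_idx : Int) (wrap_points : List Int) (out : List String) : Decidable (Spec_make_accumulated_lines_py words up_to_idx wrap_points out) := by unfold Spec_make_accumulated_lines_py; infer_instance

-- ===== CLAIM (what is proved, stated in full; the proofs are below) =====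
def Claim_equal_make_accumulated_lines_py : Prop := ∀ (words : List (List (String × String))) (up_to_idx : Int) (wrap_points : List Int), Dom_make_accumulated_lines_py words up_to_idx wrap_points → Pre_make_accumulated_lines_py words up_to_idx wrap_points → Spec_make_accumulated_lines_py words up_to_idx wrap_points (make_accumulated_lines_py words up_to_idx wrap_points)

-- ===== LEMMAS AND PROOFS =====

-- the lines produced for boundary list lo :: bs ++ [hi] (empty segments skipped)
def pvLinesOf (words : List (List (String × String))) : Int → List Int → Int → List String
  | lo, [], hi => if lo < hi then [pvSeg words lo hi] else []
  | lo, b :: bs, hi => (if lo < b then [pvSeg words lo b] else []) ++ pvLinesOf words b bs hi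

lemma pvRange_map_ne_nil (words : List (List (String × String))) {s lo : Int} (h : s < lo) :
    (PySem.List.pyRange s lo 1).map (pvGetWord words) ≠ [] := by
  rw [PySem.List.pyRange_one_cons h]; simp

-- A's loop over a break-free stretch just appends the words to current
lemma pvRunNoBreak (words : List (List (String × String))) (wp : List Int) (k : Nat) :
    ∀ (a : Int) (ls cur : List String),
      (∀ i : Int, a ≤ i → i < a + (k : Int) → i ∉ wp) →
      (PySem.List.pyRange a (a + (k : Int)) 1).foldl (pvStepA words wp) (ls, cur)
        = (ls, cur ++ (PySem.List.pyRange a (a + (k : Int)) 1).map (pvGetWord words)) := by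
  induction k with
  | zero => intro a ls cur _; simp
  | succ k ih =>
    intro a ls cur h
    rw [PySem.List.pyRange_one_cons (by push_cast; omega : a < a + ((k+1 : Nat) : Int))]
    have hne : a ∉ wp := h a le_rfl (by push_cast; omega)
    have hstep : pvStepA words wp (ls, cur) a = (ls, cur ++ [pvGetWord words a]) := by
      simp [pvStepA, hne]
    rw [List.foldl_cons, hstep]
    have heq : a + ((k+1 : Nat) : Int) = (a + 1) + (k : Int) := by push_cast; omega
    rw [heq, ih (a + 1) ls (cur ++ [pvGetWord words a])
        (fun i h1 h2 => h i (by omega) (by omega))]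
    simp

-- main invariant for A's loop: current holds the words since the last break s
lemma pvASegs (words : List (List (String × String))) (wp : List Int) (n : Int) :
    ∀ (bs : List Int) (s lo : Int) (ls : List String),
      s < lo → lo ≤ n + 1 →
      bs.Pairwise (· < ·) →
      (∀ b ∈ bs, lo ≤ b ∧ b ≤ n) →
      (∀ i : Int, lo ≤ i → i ≤ n → (i ∈ wp ↔ i ∈ bs)) →
      pvFlush ((PySem.List.pyRange lo (n + 1) 1).foldl (pvStepA words wp)
          (ls, (PySem.List.pyRange s lo 1).map (pvGetWord words)))
        = ls ++ pvLinesOf words s bs (n + 1) := by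
  intro bs
  induction bs with
  | nil =>
    intro s lo ls hs hlo _ _ hmem
    have hk : (n + 1) = lo + (((n + 1 - lo).toNat : Nat) : Int) := by omega
    rw [hk, pvRunNoBreak words wp _ lo ls _
        (fun i h1 h2 => fun hin => absurd ((hmem i h1 (by omega)).mp hin) (by simp))]
    rw [← List.map_append, ← PySem.List.pyRange_one_append s lo (lo + ((n + 1 - lo).toNat : Int)) (by omega) (by omega)]
    have : lo + (((n + 1 - lo).toNat : Nat) : Int) = n + 1 := by omega
    rw [this]
    rw [pvFlush, if_pos (pvRange_map_ne_nil words (by omega : s < n + 1))]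
    simp only [pvLinesOf]
    rw [if_pos (by omega : s < n + 1)]
    simp [pvSeg]
  | cons b bs ih =>
    intro s lo ls hs hlo hpw hbnd hmem
    have hb : lo ≤ b ∧ b ≤ n := hbnd b (List.mem_cons_self ..)
    have hblt : ∀ b' ∈ bs, b < b' := (List.pairwise_cons.mp hpw).1
    -- split the range at b
    rw [PySem.List.pyRange_one_append lo b (n + 1) hb.1 (by omega), List.foldl_append]
    have hk2 : b = lo + (((b - lo).toNat : Nat) : Int) := by omega
    rw [hk2, pvRunNoBreak words wp _ lo ls _ (by
      intro i h1 h2 hin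
      have h2' : i < b := by omega
      have := (hmem i h1 (by omega)).mp hin
      rcases List.mem_cons.mp this with h | h
      · omega
      · exact absurd (hblt i h) (by omega))]
    rw [← List.map_append, ← PySem.List.pyRange_one_append s lo (lo + ((b - lo).toNat : Int)) (by omega) (by omega)]
    rw [← hk2]
    -- step at b: flush
    rw [PySem.List.pyRange_one_cons (by omega : b < n + 1), List.foldl_cons]
    have hbin : b ∈ wp := (hmem b hb.1 hb.2).mpr (List.mem_cons_self ..)
    have hstep : pvStepA words wp (ls, (PySem.List.pyRange s b 1).map (pvGetWord words)) b
        = (ls ++ [pvSeg words s b], [pvGetWord words b]) := by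
      simp [pvStepA, hbin, pvRange_map_ne_nil words (by omega : s < b), pvSeg]
    rw [hstep]
    have hcur : [pvGetWord words b] = (PySem.List.pyRange b (b + 1) 1).map (pvGetWord words) := by
      rw [PySem.List.pyRange_one_singleton]; simp
    rw [hcur, ih b (b + 1) (ls ++ [pvSeg words s b]) (by omega) (by omega)
        (List.pairwise_cons.mp hpw).2
        (fun b' hb' => ⟨by have := hblt b' hb'; omega, (hbnd b' (List.mem_cons_of_mem _ hb')).2⟩)
        (by
          intro i h1 h2
          rw [hmem i (by omega) h2, List.mem_cons]
          constructor
          · rintro (h | h)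
            · omega
            · exact h
          · exact Or.inr)]
    simp [pvLinesOf, if_pos (by omega : s < b)]

-- B's fold over the zipped boundary pairs computes pvLinesOf
lemma pvBFold (words : List (List (String × String))) :
    ∀ (bs : List Int) (lo hi : Int) (ls : List String),
      (((lo :: bs) ++ [hi]).zip (bs ++ [hi])).foldl
          (fun ls q => if q.1 < q.2 then ls ++ [pvSeg words q.1 q.2] else ls) ls
        = ls ++ pvLinesOf words lo bs hi := by
  intro bs
  induction bs with
  | nil => intro lo hi ls; simp [pvLinesOf]; split_ifs <;> simp
  | cons b bs ih =>
    intro lo hi ls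
    show ((lo, b) :: ((b :: bs) ++ [hi]).zip (bs ++ [hi])).foldl _ ls = _
    rw [List.foldl_cons, ih b hi]
    simp only [pvLinesOf]
    split_ifs <;> simp

-- ===== VERDICT (by name: the statement is the Claim_ definition above) =====
theorem make_accumulated_lines_py_spec : Claim_equal_make_accumulated_lines_py := by
  intro words n wp _ hpre
  obtain ⟨hnd, -, -⟩ := hpre
  unfold Spec_make_accumulated_lines_py make_accumulated_lines_py make_accumulated_lines_py_alt
  set breaks := PySem.List.sorted (wp.filter (fun p => decide (1 ≤ p) && decide (p ≤ n))) (fun x => x) false with hbr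
  have hmemb : ∀ i : Int, i ∈ breaks ↔ i ∈ wp ∧ 1 ≤ i ∧ i ≤ n := by
    intro i
    rw [hbr, PySem.List.mem_sorted, List.mem_filter]
    simp
  rcases lt_or_ge n 0 with hneg | hpos
  · -- up_to_idx < 0 : both sides are []
    have hbe : breaks = [] := by
      rw [hbr, PySem.List.sorted_eq_nil_iff]
      rw [List.filter_eq_nil_iff]
      intro p _; simp; omega
    rw [PySem.List.pyRange_one_eq_nil (by omega : n + 1 ≤ 0)]
    simp only [List.foldl_nil, hbe]
    simp only [pvFlush]
    simp
    omega
  · -- 0 ≤ up_to_idx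
    have hpw : breaks.Pairwise (· < ·) := by
      have hle : breaks.Pairwise (· ≤ ·) := by
        have := PySem.List.sorted_pairwise (xs := wp.filter (fun p => decide (1 ≤ p) && decide (p ≤ n))) (key := fun x => x)
        simpa [hbr] using this
      have hndb : breaks.Nodup :=
        (PySem.List.sorted_perm _ _ _).nodup_iff.mpr (hnd.filter _)
      exact (hle.and hndb).imp (fun h => lt_of_le_of_ne h.1 h.2)
    -- A's first step (i = 0, current = [])
    rw [PySem.List.pyRange_one_cons (by omega : (0:Int) < n + 1), List.foldl_cons]
    have hstep0 : pvStepA words wp ([], []) 0 = ([], [pvGetWord words 0]) := by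
      simp [pvStepA]
    rw [hstep0]
    have hcur0 : [pvGetWord words 0] = (PySem.List.pyRange 0 (0 + 1) 1).map (pvGetWord words) := by
      rw [PySem.List.pyRange_one_singleton]; simp
    rw [hcur0, pvASegs words wp n breaks 0 (0 + 1) [] (by omega) (by omega) hpw
        (fun b hb => by have := (hmemb b).mp hb; omega)
        (fun i h1 h2 => by rw [hmemb i]; constructor
                           · exact fun h => ⟨h, by omega, h2⟩
                           · exact fun h => h.1)]
    have hB := pvBFold words breaks 0 (n + 1) []
    simp only [List.cons_append] at hB
    simpa using hB.symm
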